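-- pv_equiv track=rewrite | github.com/RobDBob/testingB | binanceHelper/SamBinanceClient.py | _order_params
-- ===== SOURCE A (Python) =====
-- from typing import Dict, Optional, List, Tuple
-- from operator import itemgetter
--
-- def _order_params(data: Dict) -> List[Tuple[str, str]]:
--     """Convert params to list with signature as last element
--
--     :param data:
--     :return:
--
--     """
--     data = dict(filter(lambda el: el[1] is not None, data.items()))
--     has_signature = False
--     params = []
--     for key, value in data.items():
--         if key == 'signature':
--             has_signature = True
--         else:
--             params.append((key, str(value)))
--     # sort parameters by key
--     params.sort(key=itemgetter(0))
--     if has_signature: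
--         params.append(('signature', data['signature']))
--     return params
-- ===== SOURCE B (Python) =====
-- def _order_params(data):
--     """Convert params to list with signature as last element.
--
--     Single pass with sorted insertion: each non-signature param is spliced
--     into its binary-searched sorted position as it is encountered (no sort
--     call); the signature value, if present and not None, is appended last
--     unconverted.
--     """
--     ordered = []
--     signature = None
--     for key, value in data.items():
--         if value is None:
--             continue
--         if key == 'signature':
--             signature = value
--             continue
--         lo, hi = 0, len(ordered)
--         while lo < hi:
--             mid = (lo + hi) // 2
--             if ordered[mid][0] < key:
--                 lo = mid + 1
--             else:
--                 hi = mid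
--         ordered.insert(lo, (key, str(value)))
--     if signature is not None:
--         ordered.append(('signature', signature))
--     return ordered
-- ===== Notes on version B (the rewrite author's own statement) =====
-- stated objective: alternative
-- what changed: Replaces A's rebuilt dict + flag loop + list.sort with a single pass that splices each non-signature param into its binary-searched sorted position (online insertion) and remembers the signature value to append last; no sort call and no intermediate dict.
import Mathlib
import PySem

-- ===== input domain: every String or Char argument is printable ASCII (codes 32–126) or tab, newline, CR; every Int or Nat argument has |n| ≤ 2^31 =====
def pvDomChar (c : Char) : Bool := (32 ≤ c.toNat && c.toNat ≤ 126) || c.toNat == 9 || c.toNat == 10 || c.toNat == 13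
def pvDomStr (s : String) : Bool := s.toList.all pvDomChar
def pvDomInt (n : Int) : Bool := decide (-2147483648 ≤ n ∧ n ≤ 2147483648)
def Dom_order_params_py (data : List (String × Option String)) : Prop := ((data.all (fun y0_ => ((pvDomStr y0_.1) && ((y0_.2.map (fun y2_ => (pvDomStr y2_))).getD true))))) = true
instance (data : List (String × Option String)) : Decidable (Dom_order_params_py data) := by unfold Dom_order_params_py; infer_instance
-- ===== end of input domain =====

-- B replaces A's dict-rebuild + flag loop + sort with a single pass that splices each
-- non-signature param into its sorted position (online insertion sort), signature kept aside.

-- ===== PORT A =====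
-- data = dict(filter(lambda el: el[1] is not None, data.items())); then the flag/append loop; params.sort; conditional append.
-- str(value) on a str is the string itself; after the None-filter the stored value is 'some s', so '.getD ""' is exact.
def order_params_py (data : List (String × Option String)) : List (String × String) :=
  let d := PySem.Dict.ofList (data.filter (fun el => el.2.isSome))
  let st := d.items.foldl
    (fun (st : Bool × List (String × String)) kv =>
      if kv.1 == "signature" then (true, st.2)
      else (st.1, st.2 ++ [(kv.1, kv.2.getD "")]))
    (false, [])
  let params := PySem.List.sorted st.2 (fun kv => kv.1)
  if st.1 then params ++ [("signature", ((d.get? "signature").getD none).getD "")] else params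

-- ===== PORT B =====
-- the inner 'while lo < hi' binary search for the splice position
-- ordered[mid]: lo ≤ mid < hi ≤ len always holds here, so getD is exact for Python's ordered[mid]
def bisectLo (ordered : List (String × String)) (key : String) (lo hi : Nat) : Nat :=
  if h : lo < hi then
    if (ordered.getD ((lo + hi) / 2) ("", "")).1 < key then bisectLo ordered key ((lo + hi) / 2 + 1) hi
    else bisectLo ordered key lo ((lo + hi) / 2)
  else lo
termination_by hi - lo
decreasing_by all_goals omega

-- the body of B's for-loop (skip None, remember signature, splice others in at the searched position)
def altStep (st : List (String × String) × Option String) (kv : String × Option String) :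
    List (String × String) × Option String :=
  match kv.2 with
  | none => st
  | some v =>
    if kv.1 == "signature" then (st.1, some v)
    else (PySem.List.insert st.1 ((bisectLo st.1 kv.1 0 st.1.length : Nat) : Int) (kv.1, v), st.2)

def order_params_py_alt (data : List (String × Option String)) : List (String × String) :=
  let st := data.foldl altStep ([], none)
  match st.2 with
  | some s => st.1 ++ [("signature", s)]
  | none => st.1

-- ===== PRECONDITION & SPEC =====
-- Pre_ excludes association lists with duplicate keys: they do not represent any Python dict
-- (dict keys are unique), so A's Python never receives such an input.
def Pre_order_params_py (data : List (String × Option String)) : Prop :=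
  (data.map Prod.fst).Nodup
instance (data : List (String × Option String)) : Decidable (Pre_order_params_py data) := by
  unfold Pre_order_params_py; infer_instance

def pvWitness_order_params_py : (List (String × Option String)) :=
  [("b", some "2"), ("signature", some "abc"), ("a", some "1"), ("c", none)]

def Spec_order_params_py (data : List (String × Option String)) (out : List (String × String)) : Prop := out = order_params_py_alt data
instance (data : List (String × Option String)) (out : List (String × String)) : Decidable (Spec_order_params_py data out) := by unfold Spec_order_params_py; infer_instance

-- ===== CLAIM (what is proved, stated in full; the proofs are below) =====
def Claim_equal_order_params_py : Prop := ∀ (data : List (String × Option String)), Dom_order_params_py data → Pre_order_params_py data → Spec_order_params_py data (order_params_py data)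

-- ===== LEMMAS AND PROOFS =====

-- proof-side linear-insertion helper: what one bisect+splice amounts to on a sorted list
def insOrd (key v : String) : List (String × String) → List (String × String)
  | [] => [(key, v)]
  | kv :: rest => if kv.1 < key then kv :: insOrd key v rest else (key, v) :: kv :: rest

-- A's loop
theorem opLoop (l : List (String × Option String)) (b : Bool) (acc : List (String × String)) :
    l.foldl (fun (st : Bool × List (String × String)) kv =>
      if kv.1 == "signature" then (true, st.2)
      else (st.1, st.2 ++ [(kv.1, kv.2.getD "")])) (b, acc)
    = (b || l.any (fun kv => kv.1 == "signature"),
       acc ++ (l.filter (fun kv => !(kv.1 == "signature"))).map (fun kv => (kv.1, kv.2.getD ""))) := by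
  induction l generalizing b acc with
  | nil => simp
  | cons h t ih =>
    simp only [List.foldl_cons]
    by_cases hh : h.1 = "signature"
    · rw [if_pos (by simp [hh]), ih]; simp [hh]
    · rw [if_neg (by simp [hh]), ih]
      have hb : (h.1 == "signature") = false := by simp [hh]
      simp [hb]

-- items of ofList on fresh keys
theorem opItems (l : List (String × Option String)) (h : (l.map Prod.fst).Nodup) :
    (PySem.Dict.ofList l).items = l := by
  have := PySem.Dict.items_foldl_insert_fresh l Prod.fst Prod.snd PySem.Dict.empty
    (fun a _ => PySem.Dict.contains_empty _) h
  simpa [PySem.Dict.ofList, PySem.Dict.update, PySem.Dict.empty] using this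

-- B's loop
theorem altLoop (l : List (String × Option String)) (acc : List (String × String)) (sg : Option String) :
    l.foldl altStep (acc, sg)
    = ( ((l.filter (fun kv => kv.2.isSome && !(kv.1 == "signature"))).map
          (fun kv => (kv.1, kv.2.getD ""))).foldl
            (fun a kv => PySem.List.insert a ((bisectLo a kv.1 0 a.length : Nat) : Int) (kv.1, kv.2)) acc,
        (l.filter (fun kv => kv.2.isSome && kv.1 == "signature")).foldl (fun _ kv => kv.2) sg ) := by
  induction l generalizing acc sg with
  | nil => simp
  | cons h t ih =>
    rcases h with ⟨k, v⟩
    cases v with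
    | none =>
      have hstep : altStep (acc, sg) (k, none) = (acc, sg) := rfl
      rw [List.foldl_cons, hstep, ih]
      simp
    | some v =>
      by_cases hk : k = "signature"
      · have hstep : altStep (acc, sg) (k, some v) = (acc, some v) := by
          simp [altStep, hk]
        rw [List.foldl_cons, hstep, ih]
        simp [hk]
      · have hb : (k == "signature") = false := by simp [hk]
        have hstep : altStep (acc, sg) (k, some v)
            = (PySem.List.insert acc ((bisectLo acc k 0 acc.length : Nat) : Int) (k, v), sg) := by
          simp [altStep, hb]
        rw [List.foldl_cons, hstep, ih]
        simp [hb]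

-- insOrd inserts at the takeWhile/dropWhile split
theorem insOrd_eq_tw (key v : String) (l : List (String × String)) :
    insOrd key v l
      = l.takeWhile (fun a => decide (a.1 < key)) ++ (key, v) :: l.dropWhile (fun a => decide (a.1 < key)) := by
  induction l with
  | nil => simp [insOrd]
  | cons kv rest ih =>
    unfold insOrd
    by_cases h : kv.1 < key
    · have hd : (decide (kv.1 < key)) = true := by simp [h]
      rw [if_pos h, List.takeWhile_cons, List.dropWhile_cons, hd, ih]
      simp
    · have hd : (decide (kv.1 < key)) = false := by simp [h]
      rw [if_neg h, List.takeWhile_cons, List.dropWhile_cons, hd]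
      simp

-- the element just after the takeWhile prefix fails the predicate
theorem takeWhile_getElem_not {α : Type} (p : α → Bool) (l : List α) (i : Nat)
    (hi : i < l.length) (heq : i = (l.takeWhile p).length) :
    p (l[i]'hi) = false := by
  induction l generalizing i with
  | nil => simp at hi
  | cons a t ih =>
    by_cases hpa : p a
    · have htw : (a :: t).takeWhile p = a :: t.takeWhile p := by simp [hpa]
      rw [htw] at heq
      cases i with
      | zero => simp at heq
      | succ j =>
        simp only [List.getElem_cons_succ]
        exact ih j (by simpa using hi) (by simpa using heq)
    · have htw : (a :: t).takeWhile p = [] := by simp [hpa]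
      rw [htw] at heq
      simp only [List.length_nil] at heq
      subst heq
      simpa using hpa

-- elements inside the takeWhile prefix satisfy the predicate
theorem takeWhile_getElem_pos {α : Type} (p : α → Bool) (l : List α) (i : Nat)
    (hi : i < l.length) (hlt : i < (l.takeWhile p).length) :
    p (l[i]'hi) = true := by
  have hpre : l.takeWhile p <+: l := List.takeWhile_prefix p
  have heq := hpre.getElem (i := i) hlt
  have h2 : p ((l.takeWhile p)[i]'hlt) = true :=
    List.mem_takeWhile_imp (List.getElem_mem hlt)
  rw [heq] at h2
  exact h2

-- binary search over a strictly key-sorted list finds the takeWhile split point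
theorem bisect_eq (l : List (String × String)) (key : String)
    (hp : l.Pairwise (fun a b => a.1 < b.1)) :
    ∀ (n lo hi : Nat), hi - lo ≤ n → hi ≤ l.length →
      lo ≤ (l.takeWhile (fun a => decide (a.1 < key))).length →
      (l.takeWhile (fun a => decide (a.1 < key))).length ≤ hi →
      bisectLo l key lo hi = (l.takeWhile (fun a => decide (a.1 < key))).length := by
  intro n
  induction n with
  | zero =>
    intro lo hi hn hhi hlo hT
    rw [bisectLo]
    rw [dif_neg (by omega)]
    omega
  | succ n ih =>
    intro lo hi hn hhi hlo hT
    by_cases h : lo < hi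
    · rw [bisectLo, dif_pos h]
      have hmid : (lo + hi) / 2 < l.length := by omega
      have hgetD : l.getD ((lo + hi) / 2) ("", "") = l[(lo + hi) / 2]'hmid :=
        List.getD_eq_getElem l ("", "") hmid
      by_cases hc : (l.getD ((lo + hi) / 2) ("", "")).1 < key
      · rw [if_pos hc]
        -- mid is inside the takeWhile prefix: otherwise l[T] ≤ l[mid] refutes hc
        have hmidT : (lo + hi) / 2 < (l.takeWhile (fun a => decide (a.1 < key))).length := by
          by_contra hge
          rw [not_lt] at hge
          set T := (l.takeWhile (fun a => decide (a.1 < key))).length with hTdef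
          have hTlen : T < l.length := by omega
          have hnotT : ((l[T]'hTlen).1 < key) = False := by
            have := takeWhile_getElem_not (fun a => decide (a.1 < key)) l T hTlen hTdef
            simp only [decide_eq_false_iff_not] at this
            simp [this]
          have hle : (l[T]'hTlen).1 ≤ (l[(lo + hi) / 2]'hmid).1 := by
            rcases Nat.lt_or_ge T ((lo + hi) / 2) with hlt | hge2
            · exact le_of_lt ((List.pairwise_iff_getElem.mp hp) T ((lo + hi) / 2) hTlen hmid hlt)
            · have : T = (lo + hi) / 2 := by omega
              simp [this]
          rw [hgetD] at hc
          exact (hnotT ▸ (lt_of_le_of_lt hle hc) : False)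
        exact ih ((lo + hi) / 2 + 1) hi (by omega) hhi (by omega) hT
      · rw [if_neg hc]
        -- mid is at or past the split: everything below T satisfies the predicate
        have hTmid : (l.takeWhile (fun a => decide (a.1 < key))).length ≤ (lo + hi) / 2 := by
          by_contra hgt
          rw [not_le] at hgt
          have := takeWhile_getElem_pos (fun a => decide (a.1 < key)) l ((lo + hi) / 2) hmid hgt
          simp only [decide_eq_true_eq] at this
          rw [hgetD] at hc
          exact hc this
        exact ih lo ((lo + hi) / 2) (by omega) (by omega) hlo hTmid
    · rw [bisectLo, dif_neg h]
      omega

-- on a strictly key-sorted list the bisect splice is exactly insOrd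
theorem bisect_insert_eq_insOrd (key v : String) (acc : List (String × String))
    (hp : acc.Pairwise (fun a b => a.1 < b.1)) :
    PySem.List.insert acc ((bisectLo acc key 0 acc.length : Nat) : Int) (key, v) = insOrd key v acc := by
  have hTle : (acc.takeWhile (fun a => decide (a.1 < key))).length ≤ acc.length :=
    (List.takeWhile_prefix _).length_le
  rw [bisect_eq acc key hp acc.length 0 acc.length (by omega) le_rfl (by omega) hTle]
  rw [PySem.List.insert_natCast acc _ (key, v) hTle]
  rw [insOrd_eq_tw]
  have htake : acc.take (acc.takeWhile (fun a => decide (a.1 < key))).length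
      = acc.takeWhile (fun a => decide (a.1 < key)) :=
    (List.prefix_iff_eq_take.mp (List.takeWhile_prefix _)).symm
  have hdrop : acc.drop (acc.takeWhile (fun a => decide (a.1 < key))).length
      = acc.dropWhile (fun a => decide (a.1 < key)) := by
    have hsplit := List.takeWhile_append_dropWhile (p := fun a => decide (a.1 < key)) (l := acc)
    nth_rewrite 2 [← hsplit]
    exact List.drop_left
  rw [htake, hdrop]

-- inserting is a permutation of consing
theorem insOrd_perm (key v : String) (l : List (String × String)) :
    (insOrd key v l).Perm ((key, v) :: l) := by
  induction l with
  | nil => simp [insOrd]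
  | cons kv rest ih =>
    unfold insOrd
    split
    · exact (ih.cons kv).trans (List.Perm.swap _ _ _)
    · exact List.Perm.refl _

-- inserting a fresh key keeps the list strictly key-sorted
theorem insOrd_pairwise (key v : String) (l : List (String × String))
    (hp : l.Pairwise (fun a b => a.1 < b.1)) (hf : ∀ a ∈ l, a.1 ≠ key) :
    (insOrd key v l).Pairwise (fun a b => a.1 < b.1) := by
  induction l with
  | nil => simp [insOrd]
  | cons kv rest ih =>
    rw [List.pairwise_cons] at hp
    unfold insOrd
    split
    next hlt =>
      refine List.Pairwise.cons ?_ (ih hp.2 (fun a ha => hf a (List.mem_cons_of_mem _ ha)))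
      intro b hb
      rcases List.mem_cons.mp ((insOrd_perm key v rest).mem_iff.mp hb) with h | h
      · rw [h]; exact hlt
      · exact hp.1 b h
    next hnlt =>
      have hk : key < kv.1 :=
        lt_of_le_of_ne (not_lt.mp hnlt) (fun h => hf kv (List.mem_cons_self) h.symm)
      refine List.Pairwise.cons ?_ (List.pairwise_cons.mpr hp)
      intro b hb
      rcases List.mem_cons.mp hb with h | h
      · rw [h]; exact hk
      · exact lt_trans hk (hp.1 b h)

-- folding insOrd permutes acc ++ m
theorem insFold_perm (m acc : List (String × String)) :
    (m.foldl (fun a kv => insOrd kv.1 kv.2 a) acc).Perm (acc ++ m) := by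
  induction m generalizing acc with
  | nil => simp
  | cons kv rest ih =>
    simp only [List.foldl_cons]
    refine (ih (insOrd kv.1 kv.2 acc)).trans ?_
    have h1 : (insOrd kv.1 kv.2 acc ++ rest).Perm (((kv.1, kv.2) :: acc) ++ rest) :=
      (insOrd_perm kv.1 kv.2 acc).append_right rest
    refine h1.trans ?_
    simpa using (List.perm_middle (a := (kv.1, kv.2)) (l₁ := acc) (l₂ := rest)).symm

-- folding insOrd over nodup fresh keys keeps strict sortedness
theorem insFold_pairwise (m acc : List (String × String))
    (hp : acc.Pairwise (fun a b => a.1 < b.1))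
    (hnd : (m.map Prod.fst).Nodup)
    (hdis : ∀ a ∈ acc, a.1 ∉ m.map Prod.fst) :
    (m.foldl (fun a kv => insOrd kv.1 kv.2 a) acc).Pairwise (fun a b => a.1 < b.1) := by
  induction m generalizing acc with
  | nil => simp only [List.foldl_nil]; exact hp
  | cons kv rest ih =>
    simp only [List.foldl_cons]
    have hkfresh : ∀ a ∈ acc, a.1 ≠ kv.1 := by
      intro a ha h
      exact hdis a ha (by simp [h])
    have hknotin : kv.1 ∉ rest.map Prod.fst := by
      simp only [List.map_cons, List.nodup_cons] at hnd; exact hnd.1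
    refine ih (insOrd kv.1 kv.2 acc) (insOrd_pairwise kv.1 kv.2 acc hp hkfresh) ?_ ?_
    · simp only [List.map_cons, List.nodup_cons] at hnd; exact hnd.2
    · intro a ha
      rcases List.mem_cons.mp ((insOrd_perm kv.1 kv.2 acc).mem_iff.mp ha) with h | h
      · rw [h]; exact hknotin
      · intro hmem
        exact hdis a h (by simp only [List.map_cons]; exact List.mem_cons_of_mem _ hmem)

-- B's bisect-splice fold equals the insOrd fold (the accumulator stays sorted throughout)
theorem foldl_bisect_eq_insOrd (m acc : List (String × String))
    (hp : acc.Pairwise (fun a b => a.1 < b.1))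
    (hnd : (m.map Prod.fst).Nodup)
    (hdis : ∀ a ∈ acc, a.1 ∉ m.map Prod.fst) :
    m.foldl (fun a kv => PySem.List.insert a ((bisectLo a kv.1 0 a.length : Nat) : Int) (kv.1, kv.2)) acc
      = m.foldl (fun a kv => insOrd kv.1 kv.2 a) acc := by
  induction m generalizing acc with
  | nil => rfl
  | cons kv rest ih =>
    simp only [List.foldl_cons]
    rw [bisect_insert_eq_insOrd kv.1 kv.2 acc hp]
    have hkfresh : ∀ a ∈ acc, a.1 ≠ kv.1 := by
      intro a ha h
      exact hdis a ha (by simp [h])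
    refine ih (insOrd kv.1 kv.2 acc) (insOrd_pairwise kv.1 kv.2 acc hp hkfresh) ?_ ?_
    · simp only [List.map_cons, List.nodup_cons] at hnd; exact hnd.2
    · intro a ha
      rcases List.mem_cons.mp ((insOrd_perm kv.1 kv.2 acc).mem_iff.mp ha) with h | h
      · rw [h]
        simp only [List.map_cons, List.nodup_cons] at hnd; exact hnd.1
      · intro hmem
        exact hdis a h (by simp only [List.map_cons]; exact List.mem_cons_of_mem _ hmem)

-- ===== VERDICT (by name: the statement is the Claim_ definition above) =====
theorem order_params_py_spec : Claim_equal_order_params_py := by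
  intro data _ hpre
  unfold Spec_order_params_py order_params_py order_params_py_alt
  simp only []
  set fl := data.filter (fun el => el.2.isSome) with hfl
  have hnd : (fl.map Prod.fst).Nodup := hpre.sublist (List.filter_sublist.map Prod.fst)
  rw [opItems fl hnd, opLoop, altLoop]
  simp only [Bool.false_or, List.nil_append]
  -- identify the two filtered lists
  have hfilter2 :
      data.filter (fun kv => kv.2.isSome && !(kv.1 == "signature"))
        = fl.filter (fun kv => !(kv.1 == "signature")) := by
    rw [hfl, List.filter_filter]
    exact List.filter_congr (fun x _ => Bool.and_comm _ _)
  have hfilter3 :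
      data.filter (fun kv => kv.2.isSome && kv.1 == "signature")
        = fl.filter (fun kv => kv.1 == "signature") := by
    rw [hfl, List.filter_filter]
    exact List.filter_congr (fun x _ => Bool.and_comm _ _)
  rw [hfilter2, hfilter3]
  set m := (fl.filter (fun kv => !(kv.1 == "signature"))).map (fun kv => (kv.1, kv.2.getD "")) with hm
  have hmnd : (m.map Prod.fst).Nodup := by
    have : m.map Prod.fst = (fl.filter (fun kv => !(kv.1 == "signature"))).map Prod.fst := by
      rw [hm, List.map_map]; rfl
    rw [this]
    exact hnd.sublist (List.filter_sublist.map Prod.fst)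
  -- sorted part: A's sort equals B's incremental bisect insertion
  have hsorted : PySem.List.sorted m (fun kv => kv.1)
      = m.foldl (fun a kv => PySem.List.insert a ((bisectLo a kv.1 0 a.length : Nat) : Int) (kv.1, kv.2)) [] := by
    rw [foldl_bisect_eq_insOrd m [] (by simp) hmnd (by simp)]
    apply PySem.List.sorted_eq_of_perm_of_pairwise_lt
    · simpa using insFold_perm m []
    · exact insFold_pairwise m [] (by simp) hmnd (by simp)
  rw [hsorted]
  -- signature part
  by_cases hb : fl.any (fun kv => kv.1 == "signature")
  case neg =>
    have hb' : (fl.any (fun kv => kv.1 == "signature")) = false := eq_false_of_ne_true hb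
    have hnil : fl.filter (fun kv => kv.1 == "signature") = [] := by
      rw [List.filter_eq_nil_iff]
      intro a ha
      have := List.any_eq_false.mp hb' a ha
      simpa using this
    rw [hb', hnil]
    simp
  case pos =>
    have hb' : (fl.any (fun kv => kv.1 == "signature")) = true := hb
    rw [hb']
    rcases hsgl : fl.filter (fun kv => kv.1 == "signature") with _ | ⟨a, t⟩
    · exfalso
      rcases List.any_eq_true.mp hb' with ⟨x, hx, hpx⟩
      have hmem : x ∈ fl.filter (fun kv => kv.1 == "signature") := List.mem_filter.mpr ⟨hx, hpx⟩
      rw [hsgl] at hmem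
      simp at hmem
    · have hat : t = [] := by
        rcases t with _ | ⟨c, t'⟩
        · rfl
        · exfalso
          have hndsg : ((fl.filter (fun kv => kv.1 == "signature")).map Prod.fst).Nodup :=
            hnd.sublist (List.filter_sublist.map Prod.fst)
          rw [hsgl] at hndsg
          have ha1 : a.1 = "signature" := by
            have := List.of_mem_filter (l := fl) (p := fun kv => kv.1 == "signature")
              (a := a) (by rw [hsgl]; simp)
            simpa using this
          have hc1 : c.1 = "signature" := by
            have := List.of_mem_filter (l := fl) (p := fun kv => kv.1 == "signature")
              (a := c) (by rw [hsgl]; simp)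
            simpa using this
          simp [ha1, hc1] at hndsg
      subst hat
      have hamem : a ∈ fl := List.mem_of_mem_filter (a := a) (by rw [hsgl]; simp)
      have ha1 : a.1 = "signature" := by
        have := List.of_mem_filter (l := fl) (p := fun kv => kv.1 == "signature")
          (a := a) (by rw [hsgl]; simp)
        simpa using this
      have hasome : a.2.isSome := by
        have := List.of_mem_filter (a := a) (hamem : a ∈ data.filter (fun el => el.2.isSome))
        simpa using this
      rcases hav : a.2 with _ | v
      · rw [hav] at hasome; simp at hasome
      have hget : (PySem.Dict.ofList fl).get? "signature" = some a.2 := by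
        apply PySem.Dict.get?_of_mem_items
        · rw [opItems fl hnd, ← ha1]
          simpa using hamem
        · exact PySem.Dict.nodup_keys_ofList fl
      rw [hget, hsgl]
      simp [hav]
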